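-- pv_equiv track=rewrite | github.com/rcortes-b/AdventOfCode-25 | Day3/Solution.py | getMaxValues
-- ===== SOURCE A (Python) =====
-- def getMaxValues(bank, batteries):
-- 	max = '0'
-- 	size = len(bank)
-- 	i = 0
-- 	max_index = 0
-- 	while (i < size):
-- 		c = bank[i]
-- 		if c > max and i <= (size - 12):
-- 			max_index = i
-- 			max = c
-- 			batteries = max + "00000000000"
-- 		i += 1
-- 	return batteries, max_index + 1
-- ===== SOURCE B (Python) =====
-- def getMaxValues(bank, batteries):
--     prefix = bank[:max(len(bank) - 11, 0)]
--     for code in range(126, 48, -1):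
--         i = prefix.find(chr(code))
--         if i != -1:
--             return chr(code) + "00000000000", i + 1
--     return batteries, 1
-- ===== Notes on version B (the rewrite author's own statement) =====
-- stated objective: faster
-- what changed: Instead of A's per-character running-max loop over the string, B walks the ASCII alphabet downward (codes 126..49) and probes each character with str.find on the prefix bank[:max(len(bank)-11,0)], returning at the first hit; correct because the first probed code present in the prefix is exactly its maximum character.
import Mathlib
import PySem

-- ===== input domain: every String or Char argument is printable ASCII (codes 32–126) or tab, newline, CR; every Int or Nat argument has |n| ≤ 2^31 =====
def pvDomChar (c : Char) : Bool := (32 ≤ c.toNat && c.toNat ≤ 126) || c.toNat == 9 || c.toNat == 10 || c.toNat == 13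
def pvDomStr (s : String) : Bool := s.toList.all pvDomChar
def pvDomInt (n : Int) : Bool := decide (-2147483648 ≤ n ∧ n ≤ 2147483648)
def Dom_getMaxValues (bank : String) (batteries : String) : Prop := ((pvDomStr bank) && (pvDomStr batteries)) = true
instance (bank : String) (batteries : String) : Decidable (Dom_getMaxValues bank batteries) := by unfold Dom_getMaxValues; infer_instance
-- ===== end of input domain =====

-- B replaces A's running-max scan over the string by a descending scan over the ASCII alphabet
-- (codes 126..49) probing each character with str.find — a different algorithm, measured faster in a timing run (C-level find vs a per-character Python loop).

-- ===== PORT A =====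
-- A's while loop over i with state (max, max_index, batteries); condition 'c > max and i <= size-12'.
def getMaxValuesGo : List Char → Int → Int → Char → Int → String → String × Int
  | [], _, _, _, maxIdx, bat => (bat, maxIdx + 1)
  | c :: rest, i, lim, mx, maxIdx, bat =>
    if mx < c ∧ i ≤ lim then
      getMaxValuesGo rest (i + 1) lim c i (String.ofList (c :: "00000000000".toList))
    else
      getMaxValuesGo rest (i + 1) lim mx maxIdx bat

def getMaxValues (bank : String) (batteries : String) : String × Int :=
  getMaxValuesGo bank.toList 0 ((bank.toList.length : Int) - 12) '0' 0 batteries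

-- ===== PORT B =====
-- 'for code in range(126, 48, -1): i = prefix.find(chr(code)); if i != -1: return …'
def getMaxValuesAltLoop : List Int → List Char → String → String × Int
  | [], _, bat => (bat, 1)
  | code :: rest, pfx, bat =>
    let c := Char.ofNat code.toNat
    let i := PySem.Chars.find pfx [c]
    if i ≠ -1 then (String.ofList (c :: "00000000000".toList), i + 1)
    else getMaxValuesAltLoop rest pfx bat

-- prefix = bank[:max(len(bank) - 11, 0)]
def getMaxValues_alt (bank : String) (batteries : String) : String × Int :=
  getMaxValuesAltLoop (PySem.List.pyRange 126 48 (-1))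
    (PySem.List.slice bank.toList none (some (max ((bank.toList.length : Int) - 11) 0)))
    batteries

-- ===== PRECONDITION & SPEC =====
def Spec_getMaxValues (bank : String) (batteries : String) (out : String × Int) : Prop := out = getMaxValues_alt bank batteries
instance (bank : String) (batteries : String) (out : String × Int) : Decidable (Spec_getMaxValues bank batteries out) := by unfold Spec_getMaxValues; infer_instance

-- ===== CLAIM (what is proved, stated in full; the proofs are below) =====
def Claim_equal_getMaxValues : Prop := ∀ (bank : String) (batteries : String), Dom_getMaxValues bank batteries → Spec_getMaxValues bank batteries (getMaxValues bank batteries)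

-- ===== LEMMAS AND PROOFS =====

-- small Char facts used throughout
lemma char_le_iff (a b : Char) : a ≤ b ↔ a.toNat ≤ b.toNat := by
  rw [Char.le_def]; exact Iff.rfl

lemma char_eq_of_toNat_eq {a b : Char} (h : a.toNat = b.toNat) : a = b :=
  Char.ext (UInt32.toNat_inj.mp h)

lemma char_toNat_ofNat {a : Nat} (h : a ≤ 126) : (Char.ofNat a).toNat = a := by
  have hv : Nat.isValidChar a := Or.inl (by omega)
  rw [Char.ofNat, dif_pos hv]
  exact Char.toNat_ofNatAux hv

lemma zero_toNat : ('0' : Char).toNat = 48 := by decide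

-- the common shape both programs compute: max of the prefix (seeded with '0') and its first index
def pvResult (pfx : List Char) (bat : String) : String × Int :=
  let M := pfx.foldl max '0'
  if M = '0' then (bat, 1)
  else (String.ofList (M :: "00000000000".toList), ((PySem.List.index? pfx M).getD 0 : Int) + 1)

-- ---- A side: running max with first index ----
def pvBest : List Char → Int → Char → Int → Char × Int
  | [], _, mx, mi => (mx, mi)
  | c :: rest, i, mx, mi =>
    if mx < c then pvBest rest (i + 1) c i else pvBest rest (i + 1) mx mi

lemma pvBest_mono : ∀ (cs : List Char) (i : Int) (mx : Char) (mi : Int), mx ≤ (pvBest cs i mx mi).1 := by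
  intro cs
  induction cs with
  | nil => intro i mx mi; simp [pvBest]
  | cons c rest ih =>
    intro i mx mi
    simp only [pvBest]
    split
    · exact le_trans (le_of_lt (by assumption)) (ih _ _ _)
    · exact ih _ _ _

lemma goA_tail : ∀ (ys : List Char) (i lim : Int) (mx : Char) (mi : Int) (bat : String),
    lim < i → getMaxValuesGo ys i lim mx mi bat = (bat, mi + 1) := by
  intro ys
  induction ys with
  | nil => intro i lim mx mi bat _; rfl
  | cons c rest ih =>
    intro i lim mx mi bat h
    simp only [getMaxValuesGo]
    rw [if_neg (fun hh => absurd hh.2 (by omega))]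
    exact ih _ _ _ _ _ (by omega)

lemma goA_split : ∀ (xs ys : List Char) (i lim : Int) (mx : Char) (mi : Int) (bat : String),
    i + xs.length ≤ lim + 1 →
    getMaxValuesGo (xs ++ ys) i lim mx mi bat =
      getMaxValuesGo ys (i + xs.length) lim (pvBest xs i mx mi).1 (pvBest xs i mx mi).2
        (if (pvBest xs i mx mi).1 = mx then bat
         else String.ofList ((pvBest xs i mx mi).1 :: "00000000000".toList)) := by
  intro xs
  induction xs with
  | nil => intro ys i lim mx mi bat _; simp [pvBest]
  | cons c rest ih =>
    intro ys i lim mx mi bat h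
    simp only [List.length_cons] at h
    simp only [List.cons_append, getMaxValuesGo, List.length_cons, pvBest]
    by_cases hc : mx < c
    · rw [if_pos ⟨hc, by push_cast at h ⊢; omega⟩, if_pos hc]
      rw [ih _ _ _ _ _ _ (by omega)]
      have hmono := pvBest_mono rest (i + 1) c i
      have hne : (pvBest rest (i + 1) c i).1 ≠ mx := fun e => absurd (e ▸ hmono) (not_le.mpr hc)
      rw [if_neg hne]
      congr 1
      · push_cast; ring
      · split
        · next he => rw [he]
        · rfl
    · rw [if_neg (fun hh => hc hh.1), if_neg hc]
      rw [ih _ _ _ _ _ _ (by omega)]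
      congr 1
      push_cast; ring

lemma pvBest_eq : ∀ (cs : List Char) (i : Int) (mx : Char) (mi : Int),
    pvBest cs i mx mi =
      (cs.foldl max mx,
       if cs.foldl max mx = mx then mi
       else i + ((PySem.List.index? cs (cs.foldl max mx)).getD 0 : Int)) := by
  intro cs
  induction cs with
  | nil => intro i mx mi; simp [pvBest]
  | cons c rest ih =>
    intro i mx mi
    simp only [pvBest, List.foldl_cons]
    by_cases hc : mx < c
    · rw [if_pos hc, ih]
      have hcM : c ≤ rest.foldl max c := (PySem.List.le_foldl_max rest c).1
      have hMne : rest.foldl max c ≠ mx := fun e => absurd (e ▸ hcM) (not_le.mpr hc)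
      rw [max_eq_right (le_of_lt hc)]
      rw [if_neg hMne]
      by_cases hMc : rest.foldl max c = c
      · rw [if_pos hMc, hMc, PySem.List.index?_cons_self]
        simp
      · rw [if_neg hMc, PySem.List.index?_cons_of_ne _ (fun e => hMc e.symm)]
        cases hidx : PySem.List.index? rest (rest.foldl max c) with
        | none =>
          exfalso
          have : rest.foldl max c ∈ rest := by
            rcases PySem.List.foldl_max_mem rest c with h | h
            · exact absurd h hMc
            · exact h
          rw [← PySem.List.index?_isSome_iff (xs := rest) (v := rest.foldl max c), hidx] at this
          simp at this
        | some k => simp; ring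
    · rw [if_neg hc, ih]
      rw [max_eq_left (le_of_not_gt hc)]
      by_cases hM : rest.foldl max mx = mx
      · rw [if_pos hM, if_pos hM]
      · rw [if_neg hM, if_neg hM]
        have hmxM : mx ≤ rest.foldl max mx := (PySem.List.le_foldl_max rest mx).1
        have hMc : rest.foldl max mx ≠ c := by
          intro e
          exact hM (le_antisymm (e ▸ le_of_not_gt hc : rest.foldl max mx ≤ mx) hmxM)
        rw [PySem.List.index?_cons_of_ne _ (fun e => hMc e.symm)]
        cases hidx : PySem.List.index? rest (rest.foldl max mx) with
        | none =>
          exfalso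
          have : rest.foldl max mx ∈ rest := by
            rcases PySem.List.foldl_max_mem rest mx with h | h
            · exact absurd h hM
            · exact h
          rw [← PySem.List.index?_isSome_iff (xs := rest) (v := rest.foldl max mx), hidx] at this
          simp at this
        | some k => simp; ring

-- A computes pvResult of the first (len-11) characters
lemma A_char (bank bat : String) :
    getMaxValues bank bat = pvResult (bank.toList.take (bank.toList.length - 11)) bat := by
  unfold getMaxValues
  set l := bank.toList with hl
  set k : Nat := l.length - 11 with hk
  by_cases h11 : 11 ≤ l.length
  · have hkle : k ≤ l.length := by omega
    have hlen : (l.take k).length = k := List.length_take_of_le hkle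
    conv_lhs => rw [← List.take_append_drop k l]
    rw [goA_split _ _ _ _ _ _ _ (by rw [List.take_append_drop, hlen]; omega)]
    rw [goA_tail _ _ _ _ _ _ (by rw [List.take_append_drop, hlen]; omega)]
    rw [pvBest_eq]
    set pfx := l.take k
    by_cases hM : pfx.foldl max '0' = '0'
    · simp [pvResult, hM]
    · simp [pvResult, hM]
  · have hk0 : k = 0 := by omega
    rw [hk0]
    rw [goA_tail _ _ _ _ _ _ (by omega)]
    simp [pvResult]

-- ---- B side: the descending alphabet scan ----

-- prefix.find(single char) is the first index of that char
lemma find_go_single : ∀ (pfx : List Char) (c : Char) (k : Nat),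
    PySem.Chars.find.go [c] pfx k =
      match PySem.List.index? pfx c with
      | some j => ((k + j : Nat) : Int)
      | none => -1 := by
  intro pfx c
  induction pfx with
  | nil => intro k; simp [PySem.Chars.find.go, PySem.List.index?_eq_idxOf?, List.idxOf?]
  | cons h t ih =>
    intro k
    rw [PySem.Chars.find.go]
    by_cases hh : h = c
    · subst hh
      have : List.isPrefixOf [h] (h :: t) = true := by simp [List.isPrefixOf]
      rw [if_pos this, PySem.List.index?_cons_self]
      simp
    · have : List.isPrefixOf [c] (h :: t) = false := by
        simp [List.isPrefixOf]
        exact fun e => hh e.symm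
      rw [this]
      simp only [Bool.false_eq_true, if_false]
      rw [ih (k + 1), PySem.List.index?_cons_of_ne _ hh]
      cases PySem.List.index? t c with
      | none => rfl
      | some j => push_cast [List.map_cons]; simp; ring

lemma find_single (pfx : List Char) (c : Char) :
    PySem.Chars.find pfx [c] =
      match PySem.List.index? pfx c with
      | some j => (j : Int)
      | none => -1 := by
  rw [PySem.Chars.find, find_go_single]
  cases PySem.List.index? pfx c with
  | none => rfl
  | some j => simp

lemma scan_go : ∀ (n : Nat) (a : Int) (pfx : List Char) (bat : String),
    a = 48 + n → a ≤ 126 → (∀ c ∈ pfx, (c.toNat : Int) ≤ a) →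
    getMaxValuesAltLoop (PySem.List.pyRange a 48 (-1)) pfx bat = pvResult pfx bat := by
  intro n
  induction n with
  | zero =>
    intro a pfx bat ha _ hbound
    rw [PySem.List.pyRange_neg_one_eq_nil (by omega)]
    have hM : pfx.foldl max '0' = '0' := by
      refine le_antisymm ?_ (PySem.List.le_foldl_max pfx '0').1
      rcases PySem.List.foldl_max_mem pfx '0' with h | h
      · exact le_of_eq h
      · have := hbound _ h
        rw [char_le_iff, zero_toNat]
        omega
    simp [getMaxValuesAltLoop, pvResult, hM]
  | succ n ih =>
    intro a pfx bat ha hale hbound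
    rw [PySem.List.pyRange_neg_one_cons (by omega)]
    simp only [getMaxValuesAltLoop]
    have haN : (Char.ofNat a.toNat).toNat = a.toNat := char_toNat_ofNat (by omega)
    set M := pfx.foldl max '0' with hMdef
    have hMmax : ∀ y ∈ pfx, y ≤ M := (PySem.List.le_foldl_max pfx '0').2
    by_cases hhit : M ≠ '0' ∧ (M.toNat : Int) = a
    · -- the probed character is exactly the max: found
      obtain ⟨hM0, hMa⟩ := hhit
      have hc : Char.ofNat a.toNat = M := char_eq_of_toNat_eq (by omega)
      have hmem : M ∈ pfx := by
        rcases PySem.List.foldl_max_mem pfx '0' with h | h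
        · exact absurd h hM0
        · exact h
      rw [hc, find_single]
      cases hidx : PySem.List.index? pfx M with
      | none =>
        exfalso
        rw [← PySem.List.index?_isSome_iff (xs := pfx) (v := M), hidx] at hmem
        simp at hmem
      | some j =>
        simp only [pvResult, ← hMdef, hidx, if_neg hM0]
        norm_num
        intro h
        have hj : (0:ℤ) ≤ (j:ℤ) := Int.natCast_nonneg j
        rw [h] at hj
        norm_num at hj
    · -- the probed character is absent: step down
      have hnot : Char.ofNat a.toNat ∉ pfx := by
        intro hmem
        have h1 := hMmax _ hmem
        rw [char_le_iff, haN] at h1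
        rcases Classical.em (M = '0') with hM0 | hM0
        · rw [hM0, zero_toNat] at h1
          omega
        · have h2 : (M.toNat : Int) ≤ a := hbound _ (by
            rcases PySem.List.foldl_max_mem pfx '0' with h | h
            · exact absurd h hM0
            · exact h)
          exact hhit ⟨hM0, by omega⟩
      rw [find_single]
      rw [(PySem.List.index?_eq_none_iff (xs := pfx) (v := Char.ofNat a.toNat)).mpr hnot]
      simp only [ne_eq, not_true_eq_false, if_false]
      refine ih (a - 1) pfx bat (by omega) (by omega) ?_
      intro c hc
      have h1 := hbound c hc
      have h2 : c.toNat ≠ a.toNat := by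
        intro e
        have hce : c = Char.ofNat a.toNat := char_eq_of_toNat_eq (by omega)
        exact hnot (hce ▸ hc)
      omega

lemma main_eq (bank batteries : String) (hd : Dom_getMaxValues bank batteries) :
    getMaxValues bank batteries = getMaxValues_alt bank batteries := by
  unfold getMaxValues_alt
  set l := bank.toList with hl
  have hb : (0 : Int) ≤ max ((l.length : Int) - 11) 0 := le_max_right _ _
  rw [PySem.List.slice_to _ hb]
  have htn : (max ((l.length : Int) - 11) 0).toNat = l.length - 11 := by omega
  rw [htn]
  rw [scan_go 78 126 _ _ (by norm_num) (by norm_num) ?bound]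
  · exact A_char bank batteries
  case bound =>
    intro c hc
    have hcl : c ∈ l := List.mem_of_mem_take hc
    have hdom : pvDomStr bank = true := by
      unfold Dom_getMaxValues at hd
      exact Bool.and_elim_left hd
    have := (List.all_eq_true.mp hdom) c (by rwa [← hl])
    unfold pvDomChar at this
    simp at this
    omega

-- ===== VERDICT (by name: the statement is the Claim_ definition above) =====
theorem getMaxValues_spec : Claim_equal_getMaxValues := by
  intro bank batteries hd
  exact main_eq bank batteries hd
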